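-- pv_equiv track=rewrite | github.com/Michael-huo/ExpHub | exphub/encode/generation_unit.py | _can_cover
-- ===== SOURCE A (Python) =====
-- def _can_cover(start_idx, end_idx, legal_positions, allowed_deltas):
--     start_idx = int(start_idx)
--     end_idx = int(end_idx)
--     if start_idx == end_idx:
--         return True
--     legal = [int(idx) for idx in legal_positions if int(start_idx) <= int(idx) <= int(end_idx)]
--     reachable = {start_idx}
--     for idx in legal:
--         if idx not in reachable:
--             continue
--         for nxt in legal:
--             if nxt <= idx:
--                 continue
--             if int(nxt) - int(idx) in allowed_deltas:
--                 reachable.add(int(nxt))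
--     return int(end_idx) in reachable
-- ===== SOURCE B (Python) =====
-- def _can_cover(start_idx, end_idx, legal_positions, allowed_deltas):
--     start_idx = int(start_idx)
--     end_idx = int(end_idx)
--     if start_idx == end_idx:
--         return True
--     legal = [int(p) for p in legal_positions if start_idx <= int(p) <= end_idx]
--     deltas = set(int(d) for d in allowed_deltas)
--     # live: values of occurrences that were reachable when the scan passed them
--     live = set()
--     for v in legal:
--         if v == start_idx or any(u < v and v - u in deltas for u in live):
--             live.add(v)
--     return end_idx in legal and any(u < end_idx and end_idx - u in deltas for u in live)
-- ===== Notes on version B (the rewrite author's own statement) =====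
-- stated objective: alternative
-- what changed: B drops A's mutable reachable set with its nested scan over legal successors; instead a single scan keeps the set of 'live' values (occurrences that were reachable when the scan passed them), decides each occurrence by testing its live predecessors against a delta hash-set, and reads the answer off the live set.
import Mathlib
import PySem

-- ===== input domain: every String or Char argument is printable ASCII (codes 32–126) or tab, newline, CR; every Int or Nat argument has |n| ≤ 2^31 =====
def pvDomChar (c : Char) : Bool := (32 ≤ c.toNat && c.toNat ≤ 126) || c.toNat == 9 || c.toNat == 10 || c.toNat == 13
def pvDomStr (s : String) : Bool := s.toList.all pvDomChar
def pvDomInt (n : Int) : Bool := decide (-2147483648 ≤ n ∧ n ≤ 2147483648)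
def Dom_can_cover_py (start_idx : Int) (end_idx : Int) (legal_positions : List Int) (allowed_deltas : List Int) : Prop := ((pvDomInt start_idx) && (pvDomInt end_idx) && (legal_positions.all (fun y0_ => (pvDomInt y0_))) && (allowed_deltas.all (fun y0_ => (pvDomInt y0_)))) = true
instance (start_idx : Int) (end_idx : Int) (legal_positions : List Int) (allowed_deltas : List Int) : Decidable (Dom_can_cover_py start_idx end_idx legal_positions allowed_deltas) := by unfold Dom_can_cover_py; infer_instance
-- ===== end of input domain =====

-- B replaces A's mutable reachable-set simulation by a per-occurrence boolean DP (objective: alternative, same cost class).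

-- ===== PORT A =====
-- Literal port of _can_cover: single pass over the filtered legal list in list order;
-- for each reachable idx, a nested scan over legal adds nxt when nxt > idx and nxt - idx is in allowed_deltas.
def can_cover_py (start_idx : Int) (end_idx : Int) (legal_positions : List Int) (allowed_deltas : List Int) : Bool :=
  if start_idx = end_idx then true
  else
    let legal := legal_positions.filter (fun idx => decide (start_idx ≤ idx ∧ idx ≤ end_idx))
    let reachable := legal.foldl (fun r idx =>
      if !(PySem.Set.contains r idx) then r
      else legal.foldl (fun r2 nxt =>
        if nxt ≤ idx then r2
        else if allowed_deltas.contains (nxt - idx) then PySem.Set.add r2 nxt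
        else r2) r) (PySem.Set.ofList [start_idx])
    PySem.Set.contains reachable end_idx

-- ===== PORT B =====
-- Port of Source B: a single scan keeping the set of live values (occurrences that were
-- reachable when the scan passed them); an occurrence v is live when v is the start or
-- some live u < v has v - u among the deltas; the answer is read off the live set.
def can_cover_py_alt (start_idx : Int) (end_idx : Int) (legal_positions : List Int) (allowed_deltas : List Int) : Bool :=
  if start_idx = end_idx then true
  else
    let legal := legal_positions.filter (fun p => decide (start_idx ≤ p ∧ p ≤ end_idx))
    let dset := PySem.Set.ofList allowed_deltas
    let live := legal.foldl (fun L v =>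
      if (v == start_idx) || L.any (fun u => decide (u < v) && PySem.Set.contains dset (v - u))
      then PySem.Set.add L v else L) PySem.Set.empty
    legal.contains end_idx && live.any (fun u => decide (u < end_idx) && PySem.Set.contains dset (end_idx - u))

-- ===== PRECONDITION & SPEC =====
def Spec_can_cover_py (start_idx : Int) (end_idx : Int) (legal_positions : List Int) (allowed_deltas : List Int) (out : Bool) : Prop := out = can_cover_py_alt start_idx end_idx legal_positions allowed_deltas
instance (start_idx : Int) (end_idx : Int) (legal_positions : List Int) (allowed_deltas : List Int) (out : Bool) : Decidable (Spec_can_cover_py start_idx end_idx legal_positions allowed_deltas out) := by unfold Spec_can_cover_py; infer_instance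

-- ===== CLAIM (what is proved, stated in full; the proofs are below) =====
def Claim_equal_can_cover_py : Prop := ∀ (start_idx : Int) (end_idx : Int) (legal_positions : List Int) (allowed_deltas : List Int), Dom_can_cover_py start_idx end_idx legal_positions allowed_deltas → Spec_can_cover_py start_idx end_idx legal_positions allowed_deltas (can_cover_py start_idx end_idx legal_positions allowed_deltas)

-- ===== LEMMAS AND PROOFS =====

-- membership after A's inner scan: x was there, or x is a legal successor of idx via an allowed delta
lemma memInnerA (ad legal : List Int) (idx : Int) : ∀ (r : List Int) (x : Int),
    x ∈ legal.foldl (fun r2 nxt =>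
        if nxt ≤ idx then r2
        else if ad.contains (nxt - idx) then PySem.Set.add r2 nxt
        else r2) r ↔ x ∈ r ∨ (x ∈ legal ∧ idx < x ∧ (x - idx) ∈ ad) := by
  induction legal with
  | nil => simp
  | cons y ys ih =>
    intro r x
    simp only [List.foldl_cons]
    split_ifs with h1 h2
    · rw [ih]
      constructor
      · rintro (hx | ⟨hm, hlt, hd⟩)
        · exact Or.inl hx
        · exact Or.inr ⟨List.mem_cons_of_mem _ hm, hlt, hd⟩
      · rintro (hx | ⟨hm, hlt, hd⟩)
        · exact Or.inl hx
        · rcases List.mem_cons.mp hm with rfl | hm'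
          · omega
          · exact Or.inr ⟨hm', hlt, hd⟩
    · rw [ih]
      simp only [PySem.Set.mem_add]
      constructor
      · rintro ((hx | rfl) | ⟨hm, hlt, hd⟩)
        · exact Or.inl hx
        · exact Or.inr ⟨List.mem_cons_self, by omega, by simpa using h2⟩
        · exact Or.inr ⟨List.mem_cons_of_mem _ hm, hlt, hd⟩
      · rintro (hx | ⟨hm, hlt, hd⟩)
        · exact Or.inl (Or.inl hx)
        · rcases List.mem_cons.mp hm with rfl | hm'
          · exact Or.inl (Or.inr rfl)
          · exact Or.inr ⟨hm', hlt, hd⟩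
    · rw [ih]
      constructor
      · rintro (hx | ⟨hm, hlt, hd⟩)
        · exact Or.inl hx
        · exact Or.inr ⟨List.mem_cons_of_mem _ hm, hlt, hd⟩
      · rintro (hx | ⟨hm, hlt, hd⟩)
        · exact Or.inl hx
        · rcases List.mem_cons.mp hm with rfl | hm'
          · exact absurd (by simpa using hd) h2
          · exact Or.inr ⟨hm', hlt, hd⟩

-- B's live-set test, read as a proposition
lemma anyLive (ad L : List Int) (w : Int) :
    (L.any (fun u => decide (u < w) && PySem.Set.contains (PySem.Set.ofList ad) (w - u))) = true
      ↔ ∃ u ∈ L, u < w ∧ (w - u) ∈ ad := by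
  simp only [List.any_eq_true, Bool.and_eq_true, decide_eq_true_eq]
  constructor
  · rintro ⟨u, hu, hlt, hc⟩
    exact ⟨u, hu, hlt, by simpa [PySem.Set.mem_ofList] using (PySem.Set.contains_iff _ _).mp hc⟩
  · rintro ⟨u, hu, hlt, hd⟩
    exact ⟨u, hu, hlt, (PySem.Set.contains_iff _ _).mpr (by simpa [PySem.Set.mem_ofList] using hd)⟩

-- the invariant tying A's reachable set to B's live set, preserved by the two folds in lockstep
lemma foldInv (s : Int) (legal ad : List Int) : ∀ (l r L : List Int),
    (∀ v ∈ l, v ∈ legal) →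
    (∀ x, x ∈ r ↔ x = s ∨ (x ∈ legal ∧ ∃ u ∈ L, u < x ∧ (x - u) ∈ ad)) →
    ∀ x, x ∈ l.foldl (fun r idx =>
        if !(PySem.Set.contains r idx) then r
        else legal.foldl (fun r2 nxt =>
          if nxt ≤ idx then r2
          else if ad.contains (nxt - idx) then PySem.Set.add r2 nxt
          else r2) r) r
      ↔ x = s ∨ (x ∈ legal ∧ ∃ u ∈ l.foldl (fun L v =>
          if (v == s) || L.any (fun u => decide (u < v) && PySem.Set.contains (PySem.Set.ofList ad) (v - u))
          then PySem.Set.add L v else L) L, u < x ∧ (x - u) ∈ ad) := by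
  intro l
  induction l with
  | nil => intro r L _ hinv x; simpa using hinv x
  | cons v rest ih =>
    intro r L hsub hinv x
    simp only [List.foldl_cons]
    have hvleg : v ∈ legal := hsub v List.mem_cons_self
    set okv := ((v == s) || L.any (fun u => decide (u < v) && PySem.Set.contains (PySem.Set.ofList ad) (v - u))) with hok
    have hvr : PySem.Set.contains r v = okv := by
      by_cases hv : v ∈ r
      · have hvt : okv = true := by
          rcases (hinv v).mp hv with rfl | ⟨_, u, hu, hlt, hd⟩
          · simp [hok]
          · rw [hok, (anyLive ad L v).mpr ⟨u, hu, hlt, hd⟩]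
            simp
        rw [hvt, (PySem.Set.contains_iff r v).mpr hv]
      · have hcf : PySem.Set.contains r v = false :=
          Bool.eq_false_iff.mpr (fun hb => hv ((PySem.Set.contains_iff r v).mp hb))
        have hvf : okv = false := by
          apply Bool.eq_false_iff.mpr
          intro hb
          apply hv
          apply (hinv v).mpr
          have hb' : (v == s) = true ∨ (L.any (fun u => decide (u < v) && PySem.Set.contains (PySem.Set.ofList ad) (v - u))) = true := by
            rw [hok] at hb; simpa using hb
          rcases hb' with h1 | h2
          · exact Or.inl (by simpa using h1)
          · exact Or.inr ⟨hvleg, (anyLive ad L v).mp h2⟩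
        rw [hvf, hcf]
    have hstep : ∀ y, y ∈ (if !(PySem.Set.contains r v) then r
        else legal.foldl (fun r2 nxt =>
          if nxt ≤ v then r2
          else if ad.contains (nxt - v) then PySem.Set.add r2 nxt
          else r2) r)
        ↔ y = s ∨ (y ∈ legal ∧ ∃ u ∈ (if okv then PySem.Set.add L v else L), u < y ∧ (y - u) ∈ ad) := by
      intro y
      by_cases hv : okv = true
      · rw [hvr]
        simp only [hv, Bool.not_true, Bool.false_eq_true, if_false, if_true]
        rw [memInnerA ad legal v r y, hinv y]
        simp only [PySem.Set.mem_add]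
        constructor
        · rintro ((rfl | ⟨hleg, u, hu, hps⟩) | ⟨hleg, hlt, hd⟩)
          · exact Or.inl rfl
          · exact Or.inr ⟨hleg, u, Or.inl hu, hps⟩
          · exact Or.inr ⟨hleg, v, Or.inr rfl, hlt, hd⟩
        · rintro (rfl | ⟨hleg, u, hu | rfl, hps⟩)
          · exact Or.inl (Or.inl rfl)
          · exact Or.inl (Or.inr ⟨hleg, u, hu, hps⟩)
          · exact Or.inr ⟨hleg, hps⟩
      · have hvf : okv = false := Bool.eq_false_iff.mpr hv
        rw [hvr]
        simp only [hvf, Bool.not_false, if_true, Bool.false_eq_true, if_false]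
        exact hinv y
    have := ih _ (if okv then PySem.Set.add L v else L)
      (fun u hu => hsub u (List.mem_cons_of_mem _ hu)) hstep x
    simpa [hok] using this

-- ===== VERDICT (by name: the statement is the Claim_ definition above) =====
theorem can_cover_py_spec : Claim_equal_can_cover_py := by
  intro s e lp ad _
  unfold Spec_can_cover_py can_cover_py can_cover_py_alt
  by_cases hse : s = e
  · simp [hse]
  · simp only [hse, if_false]
    set legal := lp.filter (fun p => decide (s ≤ p ∧ p ≤ e)) with hleg
    have hmain := foldInv s legal ad legal (PySem.Set.ofList [s]) []
      (fun _ h => h) (by intro x; simp [PySem.Set.ofList]) e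
    apply Bool.eq_iff_iff.mpr
    rw [PySem.Set.contains_iff, hmain]
    simp only [Bool.and_eq_true]
    constructor
    · rintro (rfl | ⟨hleg', u, hu, hlt, hd⟩)
      · exact absurd rfl hse
      · exact ⟨by simpa using hleg', (anyLive ad _ e).mpr ⟨u, hu, hlt, hd⟩⟩
    · rintro ⟨hc, hany⟩
      rcases (anyLive ad _ e).mp hany with ⟨u, hu, hps⟩
      exact Or.inr ⟨by simpa using hc, u, hu, hps⟩
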